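-- pv_equiv track=rewrite | github.com/ST-SARAVANAPRIYAN/intellinflate | server/python-services/number_plate_detection.py | _letters_only_with_corrections
-- ===== SOURCE A (Python) =====
-- def _letters_only_with_corrections(segment):
--     digit_to_letter = {'0': 'O', '1': 'I', '2': 'Z', '5': 'S', '6': 'G', '8': 'B'}
--     out = []
--     replacements = 0
--     for ch in segment:
--         if 'A' <= ch <= 'Z':
--             out.append(ch)
--         elif ch in digit_to_letter:
--             out.append(digit_to_letter[ch])
--             replacements += 1
--         else:
--             return None, 999
--     return ''.join(out), replacements
-- ===== SOURCE B (Python) =====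
-- def _letters_only_with_corrections(segment):
--     digit_to_letter = {'0': 'O', '1': 'I', '2': 'Z', '5': 'S', '6': 'G', '8': 'B'}
--     if any(not ('A' <= ch <= 'Z') and ch not in digit_to_letter for ch in segment):
--         return None, 999
--     translated = segment.translate(str.maketrans(digit_to_letter))
--     return translated, sum(1 for ch in segment if ch in digit_to_letter)
-- ===== Notes on version B (the rewrite author's own statement) =====
-- stated objective: idiomatic
-- what changed: A's single fused loop with early return and list-append accumulation is split into three independent passes: an any() validation, a table-driven str.translate, and a separate count of digit characters.
import Mathlib
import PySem

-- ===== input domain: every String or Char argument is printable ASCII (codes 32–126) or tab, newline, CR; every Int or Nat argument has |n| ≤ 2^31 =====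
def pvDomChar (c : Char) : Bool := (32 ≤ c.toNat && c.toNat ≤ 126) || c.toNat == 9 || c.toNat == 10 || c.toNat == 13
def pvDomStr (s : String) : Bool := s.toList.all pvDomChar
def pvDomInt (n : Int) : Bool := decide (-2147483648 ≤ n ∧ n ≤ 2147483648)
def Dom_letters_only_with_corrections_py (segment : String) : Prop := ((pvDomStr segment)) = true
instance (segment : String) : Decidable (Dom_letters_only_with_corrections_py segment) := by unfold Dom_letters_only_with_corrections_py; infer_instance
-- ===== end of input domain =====

-- B replaces A's fused early-return loop by three independent passes (validate, translate, count); objective: idiomatic, same cost.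


-- ===== PORT A =====
-- the dict digit_to_letter, as an association list (lookup = first match)
def pvDigitToLetter : List (Char × Char) :=
  [('0','O'),('1','I'),('2','Z'),('5','S'),('6','G'),('8','B')]

-- A's for-loop with early return: structural recursion carrying out-accumulator and replacement count
def pvGoA : List Char → List Char → Int → Option String × Int
  | [], out, repl => (some (String.mk out), repl)
  | ch :: rest, out, repl =>
    if 'A' ≤ ch ∧ ch ≤ 'Z' then
      pvGoA rest (out ++ [ch]) repl
    else
      match pvDigitToLetter.lookup ch with
      | some l => pvGoA rest (out ++ [l]) (repl + 1)
      | none => (none, 999)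

def letters_only_with_corrections_py (segment : String) : Option String × Int :=
  pvGoA segment.toList [] 0

-- ===== PORT B =====
-- B: validation pass (any), translation pass (map via the table), counting pass
def pvIsDigitKey (ch : Char) : Bool := (pvDigitToLetter.lookup ch).isSome

def pvTranslate (ch : Char) : Char := (pvDigitToLetter.lookup ch).getD ch

def letters_only_with_corrections_py_alt (segment : String) : Option String × Int :=
  let cs := segment.toList
  if cs.any (fun ch => !(decide ('A' ≤ ch) && decide (ch ≤ 'Z')) && !(pvIsDigitKey ch)) then
    (none, 999)
  else
    (some (String.mk (cs.map pvTranslate)), (cs.countP pvIsDigitKey : Int))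

-- ===== PRECONDITION & SPEC =====
def Spec_letters_only_with_corrections_py (segment : String) (out : Option String × Int) : Prop := out = letters_only_with_corrections_py_alt segment
instance (segment : String) (out : Option String × Int) : Decidable (Spec_letters_only_with_corrections_py segment out) := by unfold Spec_letters_only_with_corrections_py; infer_instance

-- ===== CLAIM (what is proved, stated in full; the proofs are below) =====
def Claim_equal_letters_only_with_corrections_py : Prop := ∀ (segment : String), Dom_letters_only_with_corrections_py segment → Spec_letters_only_with_corrections_py segment (letters_only_with_corrections_py segment)

-- ===== LEMMAS AND PROOFS =====
-- a character passes A's two branches iff it is uppercase or a correctable digit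
def pvOk (ch : Char) : Bool := (decide ('A' ≤ ch) && decide (ch ≤ 'Z')) || pvIsDigitKey ch

-- loop invariant: pvGoA is validation + translation + count, relative to the accumulators
lemma pvGoA_spec (cs : List Char) (out : List Char) (repl : Int) :
    pvGoA cs out repl =
      if cs.all pvOk then
        (some (String.mk (out ++ cs.map pvTranslate)), repl + (cs.countP pvIsDigitKey : Int))
      else (none, 999) := by
  induction cs generalizing out repl with
  | nil => simp [pvGoA]
  | cons ch rest ih =>
    by_cases hU : 'A' ≤ ch ∧ ch ≤ 'Z'
    · have hk : pvDigitToLetter.lookup ch = none := by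
        simp only [pvDigitToLetter, List.lookup]
        have hne : ∀ c : Char, c < 'A' → (ch == c) = false := by
          intro c hc
          simp only [beq_eq_false_iff_ne, ne_eq]
          rintro rfl; exact absurd hU.1 (not_le.mpr hc)
        rw [hne _ (by decide), hne _ (by decide), hne _ (by decide), hne _ (by decide),
          hne _ (by decide), hne _ (by decide)]
      simp only [pvGoA, if_pos hU, ih, List.all_cons, List.map_cons, List.countP_cons,
        pvOk, pvIsDigitKey, pvTranslate, hk]
      simp [hU.1, hU.2]
    · rcases hlk : pvDigitToLetter.lookup ch with _ | l
      · have : ¬ pvOk ch := by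
          simp [pvOk, pvIsDigitKey, hlk]
          exact fun a => lt_of_not_ge fun b => hU ⟨a, b⟩
        simp [pvGoA, if_neg hU, hlk, List.all_cons, this]
      · have hok : pvOk ch = true := by simp [pvOk, pvIsDigitKey, hlk]
        simp only [pvGoA, if_neg hU, hlk, ih, List.all_cons, hok, Bool.true_and,
          List.map_cons, List.countP_cons, pvTranslate, pvIsDigitKey]
        split <;> simp [Prod.mk.injEq] <;> push_cast <;> ring

-- ===== VERDICT (by name: the statement is the Claim_ definition above) =====
theorem letters_only_with_corrections_py_spec : Claim_equal_letters_only_with_corrections_py := by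
  intro segment _
  unfold Spec_letters_only_with_corrections_py letters_only_with_corrections_py letters_only_with_corrections_py_alt
  rw [pvGoA_spec]
  have hfun : (fun ch => !(decide ('A' ≤ ch) && decide (ch ≤ 'Z')) && !(pvIsDigitKey ch))
      = fun ch => !(pvOk ch) := by
    funext ch; simp [pvOk, Bool.not_or]
  rw [hfun]
  cases h : segment.toList.all pvOk <;>
    simp [show segment.toList.any (fun ch => !pvOk ch) = !segment.toList.all pvOk from
      (List.not_all_eq_any_not ..).symm, h]
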